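-- pv_equiv track=rewrite | github.com/openstenoproject/plover | plover/formatting.py | _capitalize_nowhitespace
-- ===== SOURCE A (Python) =====
-- def _capitalize_nowhitespace(s):
--     """Capitalize the first letter of s (ignoring spaces)."""
--     word_list = s.split(' ')
--     final_list = []
--     first_word = True
--     for word in word_list:
--         if len(word) > 0:
--             if first_word is True:
--                 word = word[0:1].upper() + word[1:]
--                 first_word = False
--         final_list.append(word)
--     return ' '.join(final_list)
-- ===== SOURCE B (Python) =====
-- def _capitalize_nowhitespace(s):
--     """Capitalize the first letter of s (ignoring spaces)."""
--     for i, c in enumerate(s):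
--         if c != ' ':
--             return s[:i] + c.upper() + s[i + 1:]
--     return s
-- ===== Notes on version B (the rewrite author's own statement) =====
-- stated objective: simpler
-- what changed: B recursively scans for the first non-space character and uppercases just that one character, instead of splitting the string into a word list, rebuilding it with a first-word flag and rejoining.
import Mathlib
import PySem

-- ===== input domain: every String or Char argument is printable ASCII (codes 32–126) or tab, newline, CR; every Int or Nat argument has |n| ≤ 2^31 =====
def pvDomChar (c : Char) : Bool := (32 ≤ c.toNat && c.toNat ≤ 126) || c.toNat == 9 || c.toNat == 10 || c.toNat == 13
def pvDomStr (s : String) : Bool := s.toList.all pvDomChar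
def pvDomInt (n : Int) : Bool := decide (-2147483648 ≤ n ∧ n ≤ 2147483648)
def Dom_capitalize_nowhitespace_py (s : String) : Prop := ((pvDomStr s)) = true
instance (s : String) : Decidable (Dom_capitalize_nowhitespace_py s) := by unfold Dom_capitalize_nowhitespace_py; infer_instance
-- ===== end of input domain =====

-- B replaces A's split-on-space / rebuild-word-list / rejoin pipeline by a single scan for the
-- first non-space character, uppercasing exactly that one character (objective: simpler).


-- ===== PORT A =====
-- the loop body of A: append `word` (capitalizing it if it is the first nonempty word)
def stepA (acc : List (List Char) × Bool) (word : List Char) : List (List Char) × Bool :=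
  if word.length > 0 then
    if acc.2 = true then
      (acc.1 ++ [PySem.Chars.upper (PySem.List.slice word (some 0) (some 1)) ++
                 PySem.List.slice word (some 1) none], false)
    else (acc.1 ++ [word], acc.2)
  else (acc.1 ++ [word], acc.2)

def capA_list (cs : List Char) : List Char :=
  let word_list := PySem.Chars.splitOn cs [' ']          -- s.split(' ')
  let r := word_list.foldl stepA ([], true)              -- the for-loop with (final_list, first_word)
  PySem.Chars.join [' '] r.1                             -- ' '.join(final_list)

def capitalize_nowhitespace_py (s : String) : String := String.ofList (capA_list s.toList)

-- ===== PORT B =====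
-- Source B's loop: enumerate(s); on the first c != ' ' return s[:i] + c.upper() + s[i+1:]; else return s.
-- c.upper() of a single char is [upperChar c]: exact on the ASCII domain the claim covers.
def capB_go (s : List Char) : List Char → Nat → List Char
  | [], _ => s
  | c :: rest, i =>
    if c ≠ ' ' then
      PySem.List.slice s none (some (i : Int)) ++ [PySem.Chars.upperChar c] ++
        PySem.List.slice s (some ((i : Int) + 1)) none
    else capB_go s rest (i + 1)

def capitalize_nowhitespace_py_alt (s : String) : String := String.ofList (capB_go s.toList s.toList 0)

-- ===== PRECONDITION & SPEC =====
def Spec_capitalize_nowhitespace_py (s : String) (out : String) : Prop := out = capitalize_nowhitespace_py_alt s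
instance (s : String) (out : String) : Decidable (Spec_capitalize_nowhitespace_py s out) := by unfold Spec_capitalize_nowhitespace_py; infer_instance

-- ===== CLAIM (what is proved, stated in full; the proofs are below) =====
def Claim_equal_capitalize_nowhitespace_py : Prop := ∀ (s : String), Dom_capitalize_nowhitespace_py s → Spec_capitalize_nowhitespace_py s (capitalize_nowhitespace_py s)

-- ===== LEMMAS AND PROOFS =====

-- specification both sides are reduced to: uppercase the first non-space character
def capF : List Char → List Char
  | [] => []
  | c :: rest => if c = ' ' then ' ' :: capF rest else PySem.Chars.upperChar c :: rest

-- `mysplit pre l` = Python (pre+l).split(' ') where pre has no spaces (prefix of the current word)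
def mysplit : List Char → List Char → List (List Char)
  | pre, [] => [pre]
  | pre, c :: rest => if c = ' ' then pre :: mysplit [] rest else mysplit (pre ++ [c]) rest

-- capitalize the first nonempty word
def capWords : List (List Char) → List (List Char)
  | [] => []
  | [] :: ws => [] :: capWords ws
  | (c :: w) :: ws => (PySem.Chars.upperChar c :: w) :: ws

theorem go_eq (fuel : Nat) (l cur : List Char) (acc : List (List Char))
    (h : l.length < fuel) :
    PySem.Chars.splitOn.go [' '] fuel l cur acc = acc.reverse ++ mysplit cur.reverse l := by
  induction fuel generalizing l cur acc with
  | zero => omega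
  | succ n ih =>
    cases l with
    | nil => rw [PySem.Chars.splitOn.go.eq_def]; simp [mysplit]
    | cons c rest =>
      rw [PySem.Chars.splitOn.go.eq_def]
      simp only [List.isPrefixOf, Bool.and_true]
      by_cases hc : c = ' '
      · subst hc
        simp only [beq_self_eq_true, if_pos, mysplit]
        rw [ih _ _ _ (by simpa using Nat.lt_of_succ_lt_succ h)]
        simp
      · rw [if_neg (by simpa using fun h => hc h.symm)]
        rw [ih _ _ _ (by simpa using Nat.lt_of_succ_lt_succ h)]
        simp [mysplit, hc]

theorem splitOn_eq (cs : List Char) : PySem.Chars.splitOn cs [' '] = mysplit [] cs := by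
  have := go_eq (cs.length + 1) cs [] [] (by omega)
  simpa [PySem.Chars.splitOn] using this

theorem fold_false (ws : List (List Char)) (fl : List (List Char)) :
    List.foldl stepA (fl, false) ws = (fl ++ ws, false) := by
  induction ws generalizing fl with
  | nil => simp
  | cons w ws ih => cases w <;> simp [stepA, ih]

theorem fold_true (ws : List (List Char)) (fl : List (List Char)) :
    (List.foldl stepA (fl, true) ws).1 = fl ++ capWords ws := by
  induction ws generalizing fl with
  | nil => simp [capWords]
  | cons w ws ih =>
    cases w with
    | nil => simp [stepA, capWords, ih]
    | cons c w' =>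
      simp only [List.foldl_cons, stepA]
      rw [PySem.List.slice_from _ (by omega : (0:Int) ≤ 1)]
      have h01 : PySem.List.slice (c :: w') (some 0) (some 1) = [c] := by
        rw [PySem.List.slice_toNat (xs := c :: w') (by omega) (by omega)]; simp
      rw [h01]
      simp [fold_false, capWords, PySem.Chars.upper]

theorem mysplit_ne_nil (l pre : List Char) : mysplit pre l ≠ [] := by
  cases l with
  | nil => simp [mysplit]
  | cons c rest =>
    simp only [mysplit]
    split
    · simp
    · exact mysplit_ne_nil rest (pre ++ [c])

theorem join_mysplit (l pre : List Char) :
    PySem.Chars.join [' '] (mysplit pre l) = pre ++ l := by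
  induction l generalizing pre with
  | nil => simp [mysplit, PySem.Chars.join_singleton]
  | cons c rest ih =>
    by_cases hc : c = ' '
    · subst hc
      simp only [mysplit, if_true]
      obtain ⟨w, ws, hw⟩ : ∃ w ws, mysplit [] rest = w :: ws := by
        cases h : mysplit ([] : List Char) rest with
        | nil => exact absurd h (mysplit_ne_nil rest [])
        | cons w ws => exact ⟨w, ws, rfl⟩
      rw [hw, PySem.Chars.join_cons_cons, ← hw, ih]
      simp
    · simp only [mysplit, if_neg hc]
      rw [ih]; simp

theorem capWords_mysplit (l : List Char) (p : Char) (pre : List Char) :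
    capWords (mysplit (p :: pre) l) = mysplit (PySem.Chars.upperChar p :: pre) l := by
  induction l generalizing pre with
  | nil => simp [mysplit, capWords]
  | cons c rest ih =>
    by_cases hc : c = ' '
    · subst hc; simp [mysplit, capWords]
    · simp only [mysplit, if_neg hc, List.cons_append]
      exact ih (pre ++ [c])

theorem join_capWords_mysplit (cs : List Char) :
    PySem.Chars.join [' '] (capWords (mysplit [] cs)) = capF cs := by
  induction cs with
  | nil => simp [mysplit, capWords, capF, PySem.Chars.join_singleton]
  | cons c rest ih =>
    by_cases hc : c = ' '
    · subst hc
      simp only [mysplit, if_true, capWords, capF]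
      obtain ⟨w, ws, hw⟩ : ∃ w ws, capWords (mysplit [] rest) = w :: ws := by
        cases h : mysplit ([] : List Char) rest with
        | nil => exact absurd h (mysplit_ne_nil rest [])
        | cons w ws => cases w <;> simp [capWords]
      rw [hw, PySem.Chars.join_cons_cons, ← hw, ih]
      simp
    · simp only [mysplit, if_neg hc, List.nil_append, capF]
      rw [capWords_mysplit, join_mysplit]
      simp

theorem capA_eq_capF (cs : List Char) : capA_list cs = capF cs := by
  simp only [capA_list, splitOn_eq]
  rw [fold_true]
  simpa using join_capWords_mysplit cs

theorem capB_go_eq (s : List Char) (l : List Char) (i : Nat) (h : s.drop i = l) :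
    capB_go s l i = s.take i ++ capF l := by
  induction l generalizing i with
  | nil =>
    have : s.length ≤ i := by
      by_contra hlt
      have := List.drop_eq_nil_iff.mp h
      omega
    simp [capB_go, capF, List.take_of_length_le this]
  | cons c rest ih =>
    by_cases hc : c = ' '
    · subst hc
      simp only [capB_go, ne_eq, not_true_eq_false, ite_false, capF]
      have hrest : s.drop (i + 1) = rest := by
        rw [← List.drop_drop] at *
        simp [h]
      rw [ih (i + 1) hrest]
      have hgi : s[i]? = some ' ' := by
        have h0 : (s.drop i)[0]? = some ' ' := by rw [h]; rfl
        rw [List.getElem?_drop] at h0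
        simpa using h0
      rw [List.take_add_one, hgi]
      simp
    · simp only [capB_go, ne_eq, hc, not_false_eq_true, if_pos, capF]
      rw [PySem.List.slice_to _ (by omega : (0:Int) ≤ (i:Int)),
          PySem.List.slice_from _ (by omega : (0:Int) ≤ (i:Int) + 1)]
      have h1 : ((i : Int)).toNat = i := by omega
      have h2 : ((i : Int) + 1).toNat = i + 1 := by omega
      rw [h1, h2]
      have hrest : s.drop (i + 1) = rest := by
        rw [← List.drop_drop] at *
        simp [h]
      rw [hrest]
      simp

theorem capB_eq_capF (cs : List Char) : capB_go cs cs 0 = capF cs := by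
  simpa using capB_go_eq cs cs 0 (by simp)

-- ===== VERDICT (by name: the statement is the Claim_ definition above) =====
theorem capitalize_nowhitespace_py_spec : Claim_equal_capitalize_nowhitespace_py := by
  intro s _
  unfold Spec_capitalize_nowhitespace_py capitalize_nowhitespace_py capitalize_nowhitespace_py_alt
  rw [capA_eq_capF, capB_eq_capF]
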